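-- pv_equiv track=rewrite | github.com/exoji2e/aoc20 | 17/day17.py | ngs
-- ===== SOURCE A (Python) =====
-- def ngs(c):
--     if len(c) == 0: return [[]]
--     out = []
--     for k in ngs(c[1:]):
--         out.append([c[0]-1] + k)
--         out.append([c[0]] + k)
--         out.append([c[0]+1] + k)
--     return out
-- ===== SOURCE B (Python) =====
-- def ngs(c):
--     out = [[]]
--     for x in reversed(c):
--         out = [[x + d] + k for k in out for d in (-1, 0, 1)]
--     return out
-- ===== Notes on version B (the rewrite author's own statement) =====
-- stated objective: simpler
-- what changed: Replaces A's recursion-per-coordinate (with an explicit append loop) by an iterative accumulator: fold over the reversed coordinate list, expanding the partial product with a comprehension at each step.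
import Mathlib
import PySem

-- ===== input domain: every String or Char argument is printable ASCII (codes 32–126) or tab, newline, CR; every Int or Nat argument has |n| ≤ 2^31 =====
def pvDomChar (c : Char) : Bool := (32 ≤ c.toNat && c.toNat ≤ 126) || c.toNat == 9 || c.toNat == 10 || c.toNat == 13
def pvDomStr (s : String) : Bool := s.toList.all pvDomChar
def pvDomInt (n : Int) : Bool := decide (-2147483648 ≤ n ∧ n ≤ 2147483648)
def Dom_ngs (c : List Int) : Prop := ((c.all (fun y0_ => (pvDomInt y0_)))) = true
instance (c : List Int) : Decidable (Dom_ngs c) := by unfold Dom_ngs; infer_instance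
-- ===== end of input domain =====

-- B replaces A's per-coordinate recursion by an iterative accumulator (fold over reversed c); same output, simpler decomposition.
-- ===== PORT A =====
-- A: if empty return [[]]; else loop over ngs(c[1:]) appending the three extensions.
def ngs : List Int → List (List Int)
  | [] => [[]]
  | x :: rest =>
    (ngs rest).foldl (fun out k => out ++ [[x - 1] ++ k, [x] ++ k, [x + 1] ++ k]) []

-- ===== PORT B =====
-- B: out := [[]]; for x in reversed(c): out := [[x+d]+k for k in out for d in (-1,0,1)]
def ngsStep (x : Int) (out : List (List Int)) : List (List Int) :=
  out.flatMap (fun k => [-1, 0, 1].map (fun d => [x + d] ++ k))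

def ngs_alt (c : List Int) : List (List Int) :=
  c.reverse.foldl (fun out x => ngsStep x out) [[]]

-- ===== PRECONDITION & SPEC =====
def Spec_ngs (c : List Int) (out : List (List Int)) : Prop := out = ngs_alt c
instance (c : List Int) (out : List (List Int)) : Decidable (Spec_ngs c out) := by unfold Spec_ngs; infer_instance

-- ===== CLAIM (what is proved, stated in full; the proofs are below) =====
def Claim_equal_ngs : Prop := ∀ (c : List Int), Dom_ngs c → Spec_ngs c (ngs c)

-- ===== LEMMAS AND PROOFS =====

lemma ngs_cons (x : Int) (rest : List Int) : ngs (x :: rest) = ngsStep x (ngs rest) := by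
  show (ngs rest).foldl (fun out k => out ++ [[x - 1] ++ k, [x] ++ k, [x + 1] ++ k]) [] = _
  rw [PySem.List.foldl_append_eq_flatMap]
  simp [ngsStep]
  apply List.flatMap_congr
  intro k _
  ring_nf

lemma ngs_eq_alt (c : List Int) : ngs c = ngs_alt c := by
  induction c with
  | nil => rfl
  | cons x rest ih =>
    rw [ngs_cons, ih]
    show ngsStep x (rest.reverse.foldl (fun out x => ngsStep x out) [[]]) =
      ((x :: rest).reverse).foldl (fun out x => ngsStep x out) [[]]
    rw [List.reverse_cons, List.foldl_append]
    rfl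

-- ===== VERDICT (by name: the statement is the Claim_ definition above) =====
theorem ngs_spec : Claim_equal_ngs := by
  intro c _
  exact ngs_eq_alt c
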